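-- pv_equiv track=rewrite | github.com/xyproto/zsnes | parsegen.py | find_chr
-- ===== SOURCE A (Python) =====
-- def find_next_match(s: str, match_char: str) -> int:
--     pos = -1
--     i = 0
--     while i < len(s):
--         if s[i] == match_char:
--             pos = i
--             break
--         if s[i] == '\\' and i + 1 < len(s):
--             i += 1
--         i += 1
--     return pos
--
-- def find_chr(s: str, match_char: str) -> int:
--     pos = -1
--     i = 0
--     while i < len(s):
--         if s[i] == match_char:
--             pos = i
--             break
--         if s[i] in ['"', "'"]:
--             match_pos = find_next_match(s[i+1:], s[i])
--             if match_pos >= 0: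
--                 i += match_pos + 1
--         i += 1
--     return pos
-- ===== SOURCE B (Python) =====
-- def find_chr(s: str, match_char: str) -> int:
--     # One left-to-right pass with an explicit quote/escape state machine,
--     # instead of slicing and rescanning the tail at every quote.
--     n = len(s)
--     i = 0
--     quote = None   # (quote_char, open_pos) while inside a quoted substring
--     esc = False
--     while True:
--         if i < n:
--             c = s[i]
--             if quote is None:
--                 if c == match_char:
--                     return i
--                 if c == '"' or c == "'":
--                     quote = (c, i)
--                 i += 1
--             elif esc:
--                 esc = False
--                 i += 1
--             elif c == '\\' and i + 1 < n:
--                 esc = True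
--                 i += 1
--             elif c == quote[0]:
--                 quote = None
--                 i += 1
--             else:
--                 i += 1
--         elif quote is not None:
--             # unterminated quote: treat it as an ordinary character and
--             # resume scanning right after the opening quote
--             i = quote[1] + 1
--             quote = None
--             esc = False
--         else:
--             return -1
-- ===== Notes on version B (the rewrite author's own statement) =====
-- stated objective: faster
-- what changed: Replaces A's per-quote tail slicing plus rescan by a helper with a single forward scan that keeps explicit quote/escape state (restarting after an unterminated quote), so no substring copies are made.
import Mathlib
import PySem

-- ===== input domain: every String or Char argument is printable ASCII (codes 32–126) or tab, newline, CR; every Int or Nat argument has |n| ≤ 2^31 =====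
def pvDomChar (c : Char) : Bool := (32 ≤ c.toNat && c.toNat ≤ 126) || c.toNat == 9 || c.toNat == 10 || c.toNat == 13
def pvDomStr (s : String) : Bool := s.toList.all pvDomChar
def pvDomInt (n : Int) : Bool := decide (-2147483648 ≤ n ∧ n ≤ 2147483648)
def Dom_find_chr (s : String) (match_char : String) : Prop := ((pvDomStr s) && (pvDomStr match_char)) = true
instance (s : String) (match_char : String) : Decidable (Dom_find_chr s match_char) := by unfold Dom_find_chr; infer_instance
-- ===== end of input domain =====

-- B replaces A's slice-and-rescan-per-quote with a single forward scan that tracks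
-- quote/escape state (restarting after an unterminated quote), avoiding tail copies.

-- Python `s[i] == match_char` compares the 1-char string s[i] with match_char.
def pyCharEqStr (c : Char) (t : String) : Bool := t.toList == [c]

-- ===== PORT A =====
-- while-loop of find_next_match as index recursion (break ↦ return)
def fnmGo (t : List Char) (mc : String) (j : Nat) : Int :=
  if h : j < t.length then
    if pyCharEqStr t[j] mc then (j : Int)
    else if t[j] = '\\' ∧ j + 1 < t.length then fnmGo t mc (j + 2)
    else fnmGo t mc (j + 1)
  else -1
termination_by t.length - j

def find_next_match (t : List Char) (mc : String) : Int := fnmGo t mc 0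

-- while-loop of find_chr as index recursion; the quote branch slices the tail
def findChrGoA (cs : List Char) (mc : String) (i : Nat) : Int :=
  if h : i < cs.length then
    if pyCharEqStr cs[i] mc then (i : Int)
    else if cs[i] = '"' ∨ cs[i] = '\'' then
      let mp := find_next_match (cs.drop (i + 1)) (String.ofList [cs[i]])
      if 0 ≤ mp then findChrGoA cs mc (i + mp.toNat + 1 + 1)
      else findChrGoA cs mc (i + 1)
    else findChrGoA cs mc (i + 1)
  else -1
termination_by cs.length - i

def find_chr (s : String) (match_char : String) : Int :=
  findChrGoA s.toList match_char 0

-- ===== PORT B =====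
-- invariant carried only for termination: an open quote was seen strictly before i
def QInv (quote : Option (Char × Nat)) (i : Nat) (len : Nat) : Prop :=
  ∀ q p, quote = some (q, p) → p < i ∧ p < len

-- single pass with quote/escape state; on an unterminated quote resume after it
def bGo (cs : List Char) (mc : String) (i : Nat) (quote : Option (Char × Nat))
    (esc : Bool) (hq : QInv quote i cs.length) : Int :=
  if h : i < cs.length then
    match hqq : quote with
    | none =>
      if pyCharEqStr cs[i] mc then (i : Int)
      else if cs[i] = '"' ∨ cs[i] = '\'' then
        bGo cs mc (i + 1) (some (cs[i], i)) false
          (by intro q p hp; cases hp; exact ⟨Nat.lt_succ_self i, h⟩)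
      else bGo cs mc (i + 1) none false (by intro q p hp; cases hp)
    | some (q, p) =>
      if esc then
        bGo cs mc (i + 1) (some (q, p)) false
          (by intro q' p' hp; cases hp; exact ⟨Nat.lt_succ_of_lt (hq q p rfl).1, (hq q p rfl).2⟩)
      else if cs[i] = '\\' ∧ i + 1 < cs.length then
        bGo cs mc (i + 1) (some (q, p)) true
          (by intro q' p' hp; cases hp; exact ⟨Nat.lt_succ_of_lt (hq q p rfl).1, (hq q p rfl).2⟩)
      else if cs[i] = q then
        bGo cs mc (i + 1) none false (by intro q' p' hp; cases hp)
      else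
        bGo cs mc (i + 1) (some (q, p)) false
          (by intro q' p' hp; cases hp; exact ⟨Nat.lt_succ_of_lt (hq q p rfl).1, (hq q p rfl).2⟩)
  else
    match hqq : quote with
    | some (q0, p) => bGo cs mc (p + 1) none false (by intro q' p' hp; cases hp)
    | none => -1
termination_by
  ((match quote with
    | some (_, p) => 2 * (cs.length - p)
    | none => 2 * (cs.length - i) + 1), cs.length + 1 - i)
decreasing_by
  all_goals try have hpi := hq q p rfl
  all_goals try have hpi := hq q0 p rfl
  all_goals simp [Prod.lex_def]
  all_goals omega

def find_chr_alt (s : String) (match_char : String) : Int :=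
  bGo s.toList match_char 0 none false (by intro q p hp; cases hp)

-- ===== PRECONDITION & SPEC =====
def Spec_find_chr (s : String) (match_char : String) (out : Int) : Prop := out = find_chr_alt s match_char
instance (s : String) (match_char : String) (out : Int) : Decidable (Spec_find_chr s match_char out) := by unfold Spec_find_chr; infer_instance

-- ===== CLAIM (what is proved, stated in full; the proofs are below) =====
def Claim_equal_find_chr : Prop := ∀ (s : String) (match_char : String), Dom_find_chr s match_char → Spec_find_chr s match_char (find_chr s match_char)

-- ===== LEMMAS AND PROOFS =====

-- absolute-position version of find_next_match (proof-side only)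
def fnmAbs (cs : List Char) (q : Char) (j : Nat) : Option Nat :=
  if h : j < cs.length then
    if cs[j] = q then some j
    else if cs[j] = '\\' ∧ j + 1 < cs.length then fnmAbs cs q (j + 2)
    else fnmAbs cs q (j + 1)
  else none
termination_by cs.length - j

theorem pyCharEqStr_single (c q : Char) : pyCharEqStr c (String.ofList [q]) = (q == c) := by
  simp [pyCharEqStr]

theorem fnmAbs_bounds (cs : List Char) (q : Char) (j : Nat) :
    ∀ k, fnmAbs cs q j = some k → j ≤ k ∧ k < cs.length := by
  fun_induction fnmAbs cs q j with
  | case1 j h hm => intro k hk; cases hk; exact ⟨Nat.le_refl j, h⟩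
  | case2 j h hm hbs ih => intro k hk; have := ih k hk; omega
  | case3 j h hm hbs ih => intro k hk; have := ih k hk; omega
  | case4 j h => intro k hk; cases hk

theorem fnm_drop (cs : List Char) (q : Char) (d j : Nat) :
    fnmGo (cs.drop d) (String.ofList [q]) j =
      (match fnmAbs cs q (d + j) with
       | some k => ((k : Int) - (d : Int))
       | none => -1) := by
  fun_induction fnmGo (cs.drop d) (String.ofList [q]) j with
  | case1 j h hm =>
    have hlt : d + j < cs.length := by simp at h; omega
    have he : (cs.drop d)[j]'h = cs[d+j]'hlt := List.getElem_drop
    rw [pyCharEqStr_single, he, beq_iff_eq] at hm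
    rw [fnmAbs, dif_pos hlt, if_pos hm.symm]
    push_cast; ring
  | case2 j h hm hbs ih =>
    have hlt : d + j < cs.length := by simp at h; omega
    have he : (cs.drop d)[j]'h = cs[d+j]'hlt := List.getElem_drop
    rw [pyCharEqStr_single, he] at hm
    rw [fnmAbs, dif_pos hlt]
    rw [if_neg (by simp at hm; exact fun hh => hm hh.symm)]
    rw [if_pos ⟨he ▸ hbs.1, by have := hbs.2; simp at this; omega⟩]
    rw [ih]
    have : d + j + 2 = d + (j + 2) := by omega
    rw [this]
  | case3 j h hm hbs ih =>
    have hlt : d + j < cs.length := by simp at h; omega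
    have he : (cs.drop d)[j]'h = cs[d+j]'hlt := List.getElem_drop
    rw [pyCharEqStr_single, he] at hm
    rw [fnmAbs, dif_pos hlt]
    rw [if_neg (by simp at hm; exact fun hh => hm hh.symm)]
    rw [if_neg (fun hc => hbs ⟨by rw [he]; exact hc.1, by have := hc.2; simp; omega⟩)]
    rw [ih]
    have : d + j + 1 = d + (j + 1) := by omega
    rw [this]
  | case4 j h =>
    rw [fnmAbs, dif_neg (by simp at h ⊢; omega)]

theorem bGo_inside (cs : List Char) (mc : String) (q : Char)
    (hqc : q = '"' ∨ q = '\'') (p : Nat) :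
    ∀ j (hq : QInv (some (q, p)) j cs.length),
      bGo cs mc j (some (q, p)) false hq =
        (match fnmAbs cs q j with
         | some k => bGo cs mc (k + 1) none false (by intro a b hb; cases hb)
         | none => bGo cs mc (p + 1) none false (by intro a b hb; cases hb)) := by
  suffices H : ∀ n j hq, cs.length - j ≤ n →
      bGo cs mc j (some (q, p)) false hq =
        (match fnmAbs cs q j with
         | some k => bGo cs mc (k + 1) none false (by intro a b hb; cases hb)
         | none => bGo cs mc (p + 1) none false (by intro a b hb; cases hb)) by
    intro j hq; exact H (cs.length - j) j hq (Nat.le_refl _)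
  intro n
  induction n with
  | zero =>
    intro j hq hle
    rw [bGo, dif_neg (by omega), fnmAbs, dif_neg (by omega)]
  | succ n ih =>
    intro j hq hle
    by_cases hj : j < cs.length
    · rw [bGo, dif_pos hj]
      by_cases hclose : cs[j] = q
      · have hnb : ¬(cs[j] = '\\' ∧ j + 1 < cs.length) := by
          rcases hqc with h | h <;> simp [hclose, h]
        simp only [Bool.false_eq_true, if_false]
        rw [if_neg hnb, if_pos hclose, fnmAbs, dif_pos hj, if_pos hclose]
      · by_cases hbs : cs[j] = '\\' ∧ j + 1 < cs.length
        · simp only [Bool.false_eq_true, if_false]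
          rw [if_pos hbs, bGo, dif_pos hbs.2]
          simp only [if_true]
          conv_rhs => rw [fnmAbs, dif_pos hj, if_neg hclose, if_pos hbs]
          exact ih (j + 2) _ (by omega)
        · simp only [Bool.false_eq_true, if_false]
          rw [if_neg hbs, if_neg hclose]
          conv_rhs => rw [fnmAbs, dif_pos hj, if_neg hclose, if_neg hbs]
          exact ih (j + 1) _ (by omega)
    · rw [bGo, dif_neg hj, fnmAbs, dif_neg hj]

theorem main_eq (cs : List Char) (mc : String) :
    ∀ i (hq : QInv none i cs.length),
      findChrGoA cs mc i = bGo cs mc i none false hq := by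
  intro i
  fun_induction findChrGoA cs mc i with
  | case1 i h hm =>
    intro hq
    rw [bGo, dif_pos h, if_pos hm]
  | case2 i h hm hquote mp hmp ih =>
    intro hq
    rw [bGo, dif_pos h, if_neg hm, if_pos hquote]
    rw [bGo_inside cs mc (cs[i]'h) hquote i (i + 1)
      (by intro a b hb; cases hb; exact ⟨Nat.lt_succ_self i, h⟩)]
    have hd := fnm_drop cs (cs[i]'h) (i + 1) 0
    rcases hk : fnmAbs cs (cs[i]'h) (i + 1 + 0) with _ | k
    · rw [hk] at hd
      have hd' : fnmGo (cs.drop (i + 1)) (String.ofList [cs[i]'h]) 0 = -1 := by rw [hd]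
      have hmp' : (0 : ℤ) ≤ fnmGo (cs.drop (i + 1)) (String.ofList [cs[i]'h]) 0 := hmp
      omega
    · rw [hk] at hd
      have hd' : fnmGo (cs.drop (i + 1)) (String.ofList [cs[i]'h]) 0 = (k : ℤ) - ((i : ℤ) + 1) := by
        rw [hd]; push_cast; ring
      have hb := fnmAbs_bounds cs (cs[i]'h) (i + 1 + 0) k hk
      have hmp2 : mp = (k : ℤ) - ((i : ℤ) + 1) := hd'
      have hidx : i + mp.toNat + 1 + 1 = k + 1 := by omega
      change _ = bGo cs mc (k + 1) none false _
      rw [hidx] at ih ⊢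
      exact ih _
  | case3 i h hm hquote mp hmp ih =>
    intro hq
    rw [bGo, dif_pos h, if_neg hm, if_pos hquote]
    rw [bGo_inside cs mc (cs[i]'h) hquote i (i + 1)
      (by intro a b hb; cases hb; exact ⟨Nat.lt_succ_self i, h⟩)]
    have hd := fnm_drop cs (cs[i]'h) (i + 1) 0
    rcases hk : fnmAbs cs (cs[i]'h) (i + 1 + 0) with _ | k
    · exact ih _
    · rw [hk] at hd
      have hd' : fnmGo (cs.drop (i + 1)) (String.ofList [cs[i]'h]) 0 = (k : ℤ) - ((i : ℤ) + 1) := by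
        rw [hd]; push_cast; ring
      have hmp2 : mp = (k : ℤ) - ((i : ℤ) + 1) := hd'
      have hb := fnmAbs_bounds cs (cs[i]'h) (i + 1 + 0) k hk
      omega
  | case4 i h hm hquote ih =>
    intro hq
    rw [bGo, dif_pos h, if_neg hm, if_neg hquote]
    exact ih _
  | case5 i h =>
    intro hq
    rw [bGo, dif_neg h]

-- ===== VERDICT (by name: the statement is the Claim_ definition above) =====
theorem find_chr_spec : Claim_equal_find_chr := by
  intro s mc _
  unfold Spec_find_chr find_chr find_chr_alt
  exact main_eq s.toList mc 0 _
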